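-- pv_equiv track=rewrite | github.com/zacpez/IntelligentPixel | agent.py | stateSim
-- ===== SOURCE A (Python) =====
-- def stateSim(state, other):
--
--     s = int(state)
--     o = int(other)
--     sims = simo = 0
--     while(s != 0 or o != 0):
--         if(s & 0x1):
--             sims += 1
--
--         if(o & 0x1):
--             simo += 1
--
--         s >>= 1
--         o >>= 1
--
--     return sims - simo
-- ===== SOURCE B (Python) =====
-- def stateSim(state, other):
--     # Kernighan popcount per argument: each iteration clears the lowest set
--     # bit, so only set bits are visited (A walks every bit position of both).
--     s = int(state)
--     o = int(other)
--     cs = 0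
--     while s:
--         s &= s - 1
--         cs += 1
--     co = 0
--     while o:
--         o &= o - 1
--         co += 1
--     return cs - co
-- ===== Notes on version B (the rewrite author's own statement) =====
-- stated objective: alternative
-- what changed: Instead of A's single lock-step loop that shifts both numbers through every bit position, B computes each argument's popcount independently with Brian Kernighan's bit-clearing loop (x &= x-1), visiting only the set bits, and returns the difference.
import Mathlib
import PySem

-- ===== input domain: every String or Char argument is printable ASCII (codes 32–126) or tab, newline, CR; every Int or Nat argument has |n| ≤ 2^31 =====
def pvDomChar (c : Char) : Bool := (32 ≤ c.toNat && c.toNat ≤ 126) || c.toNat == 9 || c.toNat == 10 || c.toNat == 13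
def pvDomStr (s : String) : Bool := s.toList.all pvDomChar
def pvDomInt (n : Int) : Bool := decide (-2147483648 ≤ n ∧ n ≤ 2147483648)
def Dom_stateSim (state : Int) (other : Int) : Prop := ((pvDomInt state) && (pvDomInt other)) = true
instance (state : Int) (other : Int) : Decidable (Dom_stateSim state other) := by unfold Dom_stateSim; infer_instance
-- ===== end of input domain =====

-- B replaces A's lock-step shift over every bit position by two independent
-- Kernighan bit-clearing popcount loops (alternative decomposition, not claimed faster).

-- ===== PORT A =====
-- A's while loop; the fuel only makes the recursion total in Lean: on the
-- nonnegative inputs admitted by Pre_ it is never exhausted (proved below),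
-- and on negative inputs the Python loop never terminates.
-- `s & 0x1` → Int.land s 1 (Python's & on ints = Int.land), `s >>= 1` →
-- s >>> (1:Int) (arithmetic shift = Python's >>).
def stateSimLoop (fuel : Nat) (s o sims simo : Int) : Int :=
  match fuel with
  | 0 => sims - simo
  | f + 1 =>
    if s ≠ 0 ∨ o ≠ 0 then
      stateSimLoop f (s >>> (1 : Int)) (o >>> (1 : Int))
        (if Int.land s 1 ≠ 0 then sims + 1 else sims)
        (if Int.land o 1 ≠ 0 then simo + 1 else simo)
    else sims - simo

def stateSim (state : Int) (other : Int) : Int :=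
  stateSimLoop (state.toNat + other.toNat + 1) state other 0 0

-- ===== PORT B =====
-- B's `while x: x &= x-1; c += 1` loop; fuel only for Lean totality, never
-- exhausted on the nonnegative inputs admitted by Pre_.
def kernLoop (fuel : Nat) (x c : Int) : Int :=
  match fuel with
  | 0 => c
  | f + 1 =>
    if x ≠ 0 then kernLoop f (Int.land x (x - 1)) (c + 1) else c

def stateSim_alt (state : Int) (other : Int) : Int :=
  kernLoop (state.toNat + 1) state 0 - kernLoop (other.toNat + 1) other 0

-- ===== PRECONDITION & SPEC =====
-- On any negative argument the Python A (and B) never terminates (x >> 1 and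
-- x &= x-1 never reach 0 from a negative int); Pre_ admits exactly the inputs
-- on which A returns.
def Pre_stateSim (state : Int) (other : Int) : Prop := 0 ≤ state ∧ 0 ≤ other
instance (state : Int) (other : Int) : Decidable (Pre_stateSim state other) := by
  unfold Pre_stateSim; infer_instance

def pvWitness_stateSim : Int × Int := (5, 3)

def Spec_stateSim (state : Int) (other : Int) (out : Int) : Prop := out = stateSim_alt state other
instance (state : Int) (other : Int) (out : Int) : Decidable (Spec_stateSim state other out) := by unfold Spec_stateSim; infer_instance

-- ===== CLAIM (what is proved, stated in full; the proofs are below) =====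
def Claim_equal_stateSim : Prop := ∀ (state : Int) (other : Int), Dom_stateSim state other → Pre_stateSim state other → Spec_stateSim state other (stateSim state other)

-- ===== LEMMAS AND PROOFS =====

-- binary popcount of a natural number
def pc : Nat → Nat
  | 0 => 0
  | n + 1 => (n + 1) % 2 + pc ((n + 1) / 2)
decreasing_by omega

theorem pc_rec (n : Nat) : pc n = n % 2 + pc (n / 2) := by
  cases n with
  | zero => simp [pc]
  | succ m => rw [pc]

theorem pc_double (m : Nat) : pc (2 * m) = pc m := by
  rw [pc_rec (2 * m)]
  have h1 : 2 * m % 2 = 0 := by omega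
  have h2 : 2 * m / 2 = m := by omega
  rw [h1, h2]
  omega

theorem land_pred_odd (n : Nat) (h : n % 2 = 1) : n &&& (n - 1) = n - 1 := by
  apply Nat.eq_of_testBit_eq
  intro i
  cases i with
  | zero =>
    rw [Nat.testBit_land, Nat.testBit_zero, Nat.testBit_zero]
    have : (n - 1) % 2 = 0 := by omega
    simp [h, this]
  | succ i =>
    rw [Nat.testBit_land]
    simp only [Nat.testBit_succ]
    have : (n - 1) / 2 = n / 2 := by omega
    rw [this, Bool.and_self]

theorem land_pred_even (n : Nat) (_h0 : n ≠ 0) (h : n % 2 = 0) :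
    n &&& (n - 1) = 2 * ((n / 2) &&& (n / 2 - 1)) := by
  apply Nat.eq_of_testBit_eq
  intro i
  cases i with
  | zero =>
    rw [Nat.testBit_land, Nat.testBit_zero, Nat.testBit_zero]
    have h2 : 2 * ((n / 2) &&& (n / 2 - 1)) % 2 = 0 := by omega
    simp [h, h2]
  | succ i =>
    rw [Nat.testBit_land]
    simp only [Nat.testBit_succ]
    have e1 : (n - 1) / 2 = n / 2 - 1 := by omega
    have e2 : 2 * ((n / 2) &&& (n / 2 - 1)) / 2 = (n / 2) &&& (n / 2 - 1) := by omega
    rw [e1, e2, Nat.testBit_land]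

theorem pc_land_pred (n : Nat) (h : n ≠ 0) : pc (n &&& (n - 1)) + 1 = pc n := by
  induction n using Nat.strong_induction_on with
  | _ n ih =>
    by_cases hp : n % 2 = 1
    · rw [land_pred_odd n hp, pc_rec (n - 1), pc_rec n]
      have e1 : (n - 1) % 2 = 0 := by omega
      have e2 : (n - 1) / 2 = n / 2 := by omega
      rw [e1, e2, hp]
      omega
    · have hp0 : n % 2 = 0 := by omega
      rw [land_pred_even n h hp0, pc_double, pc_rec n, hp0]
      have := ih (n / 2) (by omega) (by omega)
      omega

theorem kernLoop_eq (fuel : Nat) : ∀ (n : Nat) (c : Int), n < fuel →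
    kernLoop fuel (n : Int) c = c + pc n := by
  induction fuel with
  | zero => intro n c h; omega
  | succ f ih =>
    intro n c h
    by_cases hn : n = 0
    · subst hn
      simp [kernLoop, pc]
    · have hne : ((n : Int)) ≠ 0 := by exact_mod_cast hn
      rw [kernLoop, if_pos hne]
      have hsub : (n : Int) - 1 = ((n - 1 : Nat) : Int) := by omega
      have hland : Int.land (n : Int) ((n - 1 : Nat) : Int) = ((n &&& (n - 1) : Nat) : Int) := rfl
      rw [hsub, hland, ih (n &&& (n - 1)) (c + 1) (by have := Nat.and_le_right (n := n) (m := n - 1); omega)]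
      have := pc_land_pred n hn
      omega

theorem stateSimLoop_eq (fuel : Nat) : ∀ (m k : Nat) (a b : Int), m + k < fuel →
    stateSimLoop fuel (m : Int) (k : Int) a b = a + pc m - (b + pc k) := by
  induction fuel with
  | zero => intro m k a b h; omega
  | succ f ih =>
    intro m k a b h
    by_cases h0 : m = 0 ∧ k = 0
    · obtain ⟨hm, hk⟩ := h0
      subst hm; subst hk
      rw [stateSimLoop, if_neg (by simp)]
      simp [pc]
    · have hcond : ((m : Int)) ≠ 0 ∨ ((k : Int)) ≠ 0 := by
        rcases Nat.eq_zero_or_pos m with hm | hm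
        · right; exact_mod_cast (by omega : k ≠ 0)
        · left; exact_mod_cast (by omega : m ≠ 0)
      rw [stateSimLoop, if_pos hcond]
      have hshm : ((m : Int)) >>> (1 : Int) = ((m / 2 : Nat) : Int) := by
        have := Int.shiftRight_natCast m 1
        rw [Nat.shiftRight_one] at this
        simpa using this
      have hshk : ((k : Int)) >>> (1 : Int) = ((k / 2 : Nat) : Int) := by
        have := Int.shiftRight_natCast k 1
        rw [Nat.shiftRight_one] at this
        simpa using this
      have hlm : Int.land (m : Int) 1 = ((m % 2 : Nat) : Int) := by
        rw [show Int.land (m : Int) 1 = ((m &&& 1 : Nat) : Int) from rfl, Nat.and_one_is_mod]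
      have hlk : Int.land (k : Int) 1 = ((k % 2 : Nat) : Int) := by
        rw [show Int.land (k : Int) 1 = ((k &&& 1 : Nat) : Int) from rfl, Nat.and_one_is_mod]
      rw [hshm, hshk, hlm, hlk, ih (m / 2) (k / 2) _ _ (by omega)]
      have hm := pc_rec m
      have hk := pc_rec k
      split_ifs with c1 c2 c2 <;>
        simp only [ne_eq, Nat.cast_eq_zero] at c1 c2 <;> omega

-- ===== VERDICT (by name: the statement is the Claim_ definition above) =====
theorem stateSim_spec : Claim_equal_stateSim := by
  intro state other _ hpre
  obtain ⟨hs, ho⟩ := hpre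
  unfold Spec_stateSim stateSim stateSim_alt
  lift state to Nat using hs with m
  lift other to Nat using ho with k
  rw [Int.toNat_natCast, Int.toNat_natCast,
      stateSimLoop_eq (m + k + 1) m k 0 0 (by omega),
      kernLoop_eq (m + 1) m 0 (by omega), kernLoop_eq (k + 1) k 0 (by omega)]
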